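-- pv_equiv track=rewrite | github.com/bochuxt/curiefense | curiefense/curieconf/server/curieconf/confserver/backend/gitbackend.py | update_doc
-- ===== SOURCE A (Python) =====
-- def update_doc(doc, data):
--     udoc = doc[:]
--     enew = { e["id"]:e for e in data }
--     for i,e in enumerate(doc):
--         if e["id"] in enew:
--             udoc[i] = enew.pop(e["id"])
--     udoc += list(enew.values())
--     return udoc
-- ===== SOURCE B (Python) =====
-- def update_doc(doc, data):
--     pos = {}
--     for i, e in enumerate(doc):
--         pos.setdefault(e["id"], i)
--     enew = {x["id"]: x for x in data}
--     udoc = doc[:]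
--     for k, x in enew.items():
--         if k in pos:
--             udoc[pos[k]] = x
--         else:
--             udoc.append(x)
--     return udoc
-- ===== Notes on version B (the rewrite author's own statement) =====
-- stated objective: alternative
-- what changed: B drives the merge loop off the deduplicated data dict and a precomputed first-position index over doc, instead of scanning doc while popping entries out of a marker dict.
import Mathlib
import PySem

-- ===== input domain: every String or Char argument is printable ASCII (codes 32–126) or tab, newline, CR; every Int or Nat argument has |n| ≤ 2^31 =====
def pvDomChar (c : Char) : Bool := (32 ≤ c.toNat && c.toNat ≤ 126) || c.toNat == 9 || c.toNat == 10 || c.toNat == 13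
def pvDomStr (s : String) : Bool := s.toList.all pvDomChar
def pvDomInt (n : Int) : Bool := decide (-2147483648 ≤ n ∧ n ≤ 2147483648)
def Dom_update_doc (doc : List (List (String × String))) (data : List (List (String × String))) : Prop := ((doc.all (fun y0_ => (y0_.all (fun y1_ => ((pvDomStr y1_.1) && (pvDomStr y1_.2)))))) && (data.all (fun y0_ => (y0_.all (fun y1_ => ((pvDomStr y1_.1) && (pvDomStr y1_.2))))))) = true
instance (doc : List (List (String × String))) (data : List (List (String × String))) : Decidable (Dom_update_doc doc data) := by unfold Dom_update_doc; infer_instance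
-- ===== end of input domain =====

-- B merges data into doc via a first-position index over doc, driving the loop off the deduplicated
-- data dict instead of popping a marker dict while scanning doc (same cost, different decomposition).


-- ===== PORT A =====
-- e["id"]: first-match lookup in the entry's association list.  Pre_update_doc guarantees the key
-- is present, so the "" default is never reached on admitted inputs (Python raises KeyError there).
def pvGetId (e : List (String × String)) : String :=
  ((PySem.Dict.mk e).get? "id").getD ""

-- enew = { e["id"]: e for e in data }  (this comprehension is the same line in A and in Source B)
def pvEnew (data : List (List (String × String))) : PySem.Dict String (List (String × String)) :=
  data.foldl (fun d e => d.insert (pvGetId e) e) PySem.Dict.empty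

-- loop body of A: 'if e["id"] in enew: udoc[i] = enew.pop(e["id"])' — pop? is lookup+erase, none
-- exactly when the membership test fails.  i comes from enumerate so 0 ≤ i < len(udoc): toNat exact.
def pvStepA (st : List (List (String × String)) × PySem.Dict String (List (String × String)))
    (p : Int × List (String × String)) :
    List (List (String × String)) × PySem.Dict String (List (String × String)) :=
  match st.2.pop? (pvGetId p.2) with
  | some (v, en') => (st.1.set p.1.toNat v, en')
  | none => st

def update_doc (doc : List (List (String × String))) (data : List (List (String × String))) : List (List (String × String)) :=
  let r := (PySem.List.enumerate doc 0).foldl pvStepA (doc, pvEnew data)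
  r.1 ++ r.2.values

-- ===== PORT B =====
-- pos: first index of each id in doc ('pos.setdefault(e["id"], i)')
def pvPos (doc : List (List (String × String))) : PySem.Dict String Int :=
  (PySem.List.enumerate doc 0).foldl (fun p ie => p.setdefault (pvGetId ie.2) ie.1) PySem.Dict.empty

-- loop body of Source B: 'if k in pos: udoc[pos[k]] = x else: udoc.append(x)'; pos values are
-- enumerate indices, 0 ≤ i < len(doc) ≤ len(udoc): toNat exact.
def pvStepB (pos : PySem.Dict String Int) (udoc : List (List (String × String)))
    (kv : String × List (String × String)) : List (List (String × String)) :=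
  match pos.get? kv.1 with
  | some i => udoc.set i.toNat kv.2
  | none => udoc ++ [kv.2]

def update_doc_alt (doc : List (List (String × String))) (data : List (List (String × String))) : List (List (String × String)) :=
  (pvEnew data).items.foldl (pvStepB (pvPos doc)) doc

-- ===== PRECONDITION & SPEC =====
-- Pre_ excludes exactly the inputs where some entry has no "id" key: there Python A (and Source B) raise KeyError.
def Pre_update_doc (doc : List (List (String × String))) (data : List (List (String × String))) : Prop :=
  (∀ e ∈ doc, ((PySem.Dict.mk e).get? "id").isSome = true) ∧
  (∀ e ∈ data, ((PySem.Dict.mk e).get? "id").isSome = true)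
instance (doc : List (List (String × String))) (data : List (List (String × String))) : Decidable (Pre_update_doc doc data) := by unfold Pre_update_doc; infer_instance

def pvWitness_update_doc : (List (List (String × String))) × (List (List (String × String))) :=
  ([[("id", "a"), ("x", "1")], [("id", "b"), ("x", "2")]], [[("id", "b"), ("x", "9")], [("id", "c"), ("x", "3")]])

def Spec_update_doc (doc : List (List (String × String))) (data : List (List (String × String))) (out : List (List (String × String))) : Prop := out = update_doc_alt doc data
instance (doc : List (List (String × String))) (data : List (List (String × String))) (out : List (List (String × String))) : Decidable (Spec_update_doc doc data out) := by unfold Spec_update_doc; infer_instance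

-- ===== CLAIM (what is proved, stated in full; the proofs are below) =====
def Claim_equal_update_doc : Prop := ∀ (doc : List (List (String × String))) (data : List (List (String × String))), Dom_update_doc doc data → Pre_update_doc doc data → Spec_update_doc doc data (update_doc doc data)

-- ===== LEMMAS AND PROOFS =====

-- Common recursive description of the merge: pop the id of each doc entry in order, then append survivors.
def pvFA : List (List (String × String)) → PySem.Dict String (List (String × String)) → List (List (String × String))
  | [], d => d.values
  | e :: t, d =>
    match d.pop? (pvGetId e) with
    | some (v, d') => v :: pvFA t d'
    | none => e :: pvFA t d

theorem pvShiftA (t : List (List (String × String))) :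
    ∀ (s : Int) (h : List (String × String)) (u : List (List (String × String)))
      (d : PySem.Dict String (List (String × String))), 0 ≤ s →
    (PySem.List.enumerate t (s+1)).foldl pvStepA (h :: u, d)
      = (h :: ((PySem.List.enumerate t s).foldl pvStepA (u, d)).1,
         ((PySem.List.enumerate t s).foldl pvStepA (u, d)).2) := by
  induction t with
  | nil => intro s h u d hs; simp [PySem.List.enumerate_nil]
  | cons e t ih =>
    intro s h u d hs
    rw [PySem.List.enumerate_cons, PySem.List.enumerate_cons, List.foldl_cons, List.foldl_cons]
    have hset : ∀ v, (h :: u).set (s+1).toNat v = h :: u.set s.toNat v := by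
      intro v
      have : (s+1).toNat = s.toNat + 1 := by omega
      rw [this]; rfl
    unfold pvStepA
    cases hp : d.pop? (pvGetId e) with
    | none => exact ih (s+1) h u d (by omega)
    | some vd =>
      simp only [hset]
      exact ih (s+1) h (u.set s.toNat vd.1) vd.2 (by omega)

theorem pvA_eq_fA (doc : List (List (String × String))) :
    ∀ d, (((PySem.List.enumerate doc 0).foldl pvStepA (doc, d)).1
      ++ ((PySem.List.enumerate doc 0).foldl pvStepA (doc, d)).2.values) = pvFA doc d := by
  induction doc with
  | nil => intro d; simp [PySem.List.enumerate_nil, pvFA]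
  | cons e t ih =>
    intro d
    rw [PySem.List.enumerate_cons, List.foldl_cons]
    cases hp : d.pop? (pvGetId e) with
    | none =>
      have hstep : pvStepA (e :: t, d) (0, e) = (e :: t, d) := by simp [pvStepA, hp]
      rw [hstep, pvShiftA t 0 e t d (le_refl 0)]
      simp only [pvFA, hp]
      simpa using ih d
    | some vd =>
      have hstep : pvStepA (e :: t, d) (0, e) = (vd.1 :: t, vd.2) := by
        simp [pvStepA, hp]
      rw [hstep, pvShiftA t 0 vd.1 t vd.2 (le_refl 0)]
      simp only [pvFA, hp]
      simpa using ih vd.2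

theorem pvPosGet (t : List (List (String × String))) :
    ∀ (s : Int) (d : PySem.Dict String Int) (k : String),
    ((PySem.List.enumerate t s).foldl (fun p ie => p.setdefault (pvGetId ie.2) ie.1) d).get? k
      = if d.contains k then d.get? k
        else (PySem.List.index? (t.map pvGetId) k).map (fun n => s + (n : Int)) := by
  induction t with
  | nil =>
    intro s d k
    simp only [PySem.List.enumerate_nil, List.foldl_nil, List.map_nil]
    split_ifs with hc
    · rfl
    · rw [(PySem.Dict.get?_eq_none_iff_contains d k).2 (by simpa using hc)]
      simp [PySem.List.index?_eq_idxOf?]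
  | cons e t ih =>
    intro s d k
    rw [PySem.List.enumerate_cons, List.foldl_cons]
    rw [ih (s+1) (d.setdefault (pvGetId e) s) k]
    by_cases hc : d.contains k = true
    · have hc' : (d.setdefault (pvGetId e) s).contains k = true := by
        by_cases he : d.contains (pvGetId e) = true
        · rwa [PySem.Dict.setdefault_of_contains d s he]
        · rw [PySem.Dict.setdefault_of_not_contains d s (by simpa using he)]
          rw [PySem.Dict.contains_insert]; simp [hc]
      have hg : (d.setdefault (pvGetId e) s).get? k = d.get? k := by
        by_cases he : d.contains (pvGetId e) = true
        · rw [PySem.Dict.setdefault_of_contains d s he]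
        · rw [PySem.Dict.setdefault_of_not_contains d s (by simpa using he)]
          have hne : k ≠ pvGetId e := by
            rintro rfl; rw [hc] at he; exact he rfl
          exact PySem.Dict.get?_insert_of_ne d s hne
      simp [hc, hc', hg]
    · have hdc : d.contains k = false := by simpa using hc
      by_cases hk : k = pvGetId e
      · subst hk
        rw [PySem.Dict.setdefault_of_not_contains d s hdc]
        rw [if_pos (PySem.Dict.contains_insert_self d (pvGetId e) s),
          PySem.Dict.get?_insert_self, if_neg (by simp [hdc]), List.map_cons,
          PySem.List.index?_cons_self]
        simp
      · have hsame : d.setdefault (pvGetId e) s = d ∨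
            d.setdefault (pvGetId e) s = d.insert (pvGetId e) s := by
          by_cases he : d.contains (pvGetId e) = true
          · exact Or.inl (PySem.Dict.setdefault_of_contains d s he)
          · exact Or.inr (PySem.Dict.setdefault_of_not_contains d s (by simpa using he))
        have hc' : (d.setdefault (pvGetId e) s).contains k = false := by
          rcases hsame with h | h <;> rw [h]
          · exact hdc
          · rw [PySem.Dict.contains_insert]; simp [hdc, hk]
        rw [if_neg (by simp [hc']), if_neg (by simp [hdc])]
        rw [List.map_cons, PySem.List.index?_cons_of_ne (t.map pvGetId) (fun h => hk h.symm)]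
        cases PySem.List.index? (t.map pvGetId) k with
        | none => rfl
        | some n => simp; omega

theorem pvPos_get (doc : List (List (String × String))) (k : String) :
    (pvPos doc).get? k = (PySem.List.index? (doc.map pvGetId) k).map (fun n => (n : Int)) := by
  unfold pvPos
  rw [pvPosGet doc 0 PySem.Dict.empty k]
  simp [PySem.Dict.contains_empty]

theorem pvFoldB_no (e : List (String × String)) (t : List (List (String × String))) :
    ∀ (L : List (String × List (String × String))) (h : List (String × String))
      (u : List (List (String × String))),
    pvGetId e ∉ L.map Prod.fst →
    L.foldl (pvStepB (pvPos (e :: t))) (h :: u) = h :: L.foldl (pvStepB (pvPos t)) u := by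
  intro L
  induction L with
  | nil => intro h u _; rfl
  | cons kv L ih =>
    intro h u hmem
    simp only [List.map_cons, List.mem_cons, not_or] at hmem
    obtain ⟨hne, hmem⟩ := hmem
    have hA : pvStepB (pvPos (e :: t)) (h :: u) kv = h :: pvStepB (pvPos t) u kv := by
      unfold pvStepB
      rw [pvPos_get, pvPos_get, List.map_cons,
        PySem.List.index?_cons_of_ne (t.map pvGetId) hne]
      cases hix : PySem.List.index? (t.map pvGetId) kv.1 with
      | none => rfl
      | some n => simp
    rw [List.foldl_cons, List.foldl_cons, hA]
    exact ih h (pvStepB (pvPos t) u kv) hmem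

theorem pvB_eq_fA (doc : List (List (String × String))) :
    ∀ (d : PySem.Dict String (List (String × String))), d.keys.Nodup →
    d.items.foldl (pvStepB (pvPos doc)) doc = pvFA doc d := by
  induction doc with
  | nil =>
    intro d _
    have : ∀ (L : List (String × List (String × String))) (u : List (List (String × String))),
        L.foldl (pvStepB (pvPos [])) u = u ++ L.map Prod.snd := by
      intro L u
      have hstep : ∀ uu kv, pvStepB (pvPos []) uu kv = uu ++ [kv.2] := by
        intro uu kv; unfold pvStepB; rw [pvPos_get]; rfl
      calc L.foldl (pvStepB (pvPos [])) u
          = L.foldl (fun uu kv => uu ++ [kv.2]) u := by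
            exact PySem.List.foldl_congr_mem L _ _ u (fun acc kv _ => hstep acc kv)
        _ = u ++ L.map Prod.snd := PySem.List.foldl_append_singleton_eq_map _ L u
    rw [this d.items []]
    rfl
  | cons e t ih =>
    intro d hnd
    by_cases hc : d.contains (pvGetId e) = true
    · -- the id of e is in the dict: split d.items around its unique (pvGetId e, v0) pair
      obtain ⟨v0, hg⟩ : ∃ v0, d.get? (pvGetId e) = some v0 := by
        cases hgg : d.get? (pvGetId e) with
        | none => rw [(PySem.Dict.get?_eq_none_iff_contains d _).1 hgg] at hc; cases hc
        | some v => exact ⟨v, rfl⟩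
      have hmem : (pvGetId e, v0) ∈ d.items := PySem.Dict.mem_items_of_get?_eq_some d hg
      obtain ⟨L1, L2, hsplit⟩ := List.append_of_mem hmem
      have hnd' : (L1.map Prod.fst ++ pvGetId e :: L2.map Prod.fst).Nodup := by
        have h0 : d.keys = d.items.map Prod.fst := rfl
        rw [h0, hsplit, List.map_append, List.map_cons] at hnd; exact hnd
      have hL1 : pvGetId e ∉ L1.map Prod.fst := by
        intro hx
        exact List.disjoint_of_nodup_append hnd' hx (List.mem_cons_self)
      have hL2 : pvGetId e ∉ L2.map Prod.fst :=
        (List.nodup_cons.1 (List.Nodup.of_append_right hnd')).1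
      have hstep0 : ∀ (X : List (List (String × String))),
          pvStepB (pvPos (e :: t)) (e :: X) (pvGetId e, v0) = v0 :: X := by
        intro X
        unfold pvStepB
        rw [pvPos_get, List.map_cons, PySem.List.index?_cons_self]
        rfl
      have herase : (d.erase (pvGetId e)).items = L1 ++ L2 := by
        show (d.items.filter fun p => !p.1 == pvGetId e) = L1 ++ L2
        rw [hsplit, List.filter_append, List.filter_cons]
        have h1 : L1.filter (fun p => !p.1 == pvGetId e) = L1 := by
          rw [List.filter_eq_self]
          intro p hp
          simp only [Bool.not_eq_eq_eq_not, Bool.not_true, beq_eq_false_iff_ne]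
          intro hq; exact hL1 (hq ▸ List.mem_map_of_mem hp)
        have h2 : L2.filter (fun p => !p.1 == pvGetId e) = L2 := by
          rw [List.filter_eq_self]
          intro p hp
          simp only [Bool.not_eq_eq_eq_not, Bool.not_true, beq_eq_false_iff_ne]
          intro hq; exact hL2 (hq ▸ List.mem_map_of_mem hp)
        simp [h1, h2]
      have hnd2 : (d.erase (pvGetId e)).keys.Nodup := by
        show ((d.erase (pvGetId e)).items.map Prod.fst).Nodup
        rw [herase, List.map_append]
        exact hnd'.sublist
          (List.Sublist.append_left (List.sublist_cons_self _ _) (L1.map Prod.fst))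
      have hpop : d.pop? (pvGetId e) = some (v0, d.erase (pvGetId e)) := by
        show (d.get? (pvGetId e)).map _ = _
        rw [hg]; rfl
      rw [hsplit, List.foldl_append, pvFoldB_no e t L1 e t hL1, List.foldl_cons, hstep0,
        pvFoldB_no e t L2 v0 (L1.foldl (pvStepB (pvPos t)) t) hL2, ← List.foldl_append,
        ← herase, ih (d.erase (pvGetId e)) hnd2]
      simp only [pvFA, hpop]
    · -- the id of e is not in the dict
      have hc' : d.contains (pvGetId e) = false := by simpa using hc
      have hmem : pvGetId e ∉ d.items.map Prod.fst := by
        intro hx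
        have : d.contains (pvGetId e) = true := by
          rw [PySem.Dict.contains_iff_mem_keys]; exact hx
        rw [this] at hc'; cases hc'
      have hpop : d.pop? (pvGetId e) = none := by
        show (d.get? (pvGetId e)).map _ = _
        rw [(PySem.Dict.get?_eq_none_iff_contains d _).2 hc']; rfl
      rw [pvFoldB_no e t d.items e t hmem, ih d hnd]
      simp only [pvFA, hpop]

theorem pvEnew_nodup (data : List (List (String × String))) : (pvEnew data).keys.Nodup := by
  unfold pvEnew
  exact PySem.Dict.nodup_keys_foldl_insert_key data pvGetId (fun d e => e) PySem.Dict.empty PySem.Dict.nodup_keys_empty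

-- ===== VERDICT (by name: the statement is the Claim_ definition above) =====
theorem update_doc_spec : Claim_equal_update_doc := by
  intro doc data _ _
  unfold Spec_update_doc update_doc update_doc_alt
  rw [pvB_eq_fA doc (pvEnew data) (pvEnew_nodup data)]
  exact pvA_eq_fA doc (pvEnew data)
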